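-- pv_equiv track=rewrite | github.com/picosdh/codetree-TILs | 240923/정수 분배하기/distributing-integers.py | max_k
-- ===== SOURCE A (Python) =====
-- def can_make_k(values, k, m):
--     count = 0
--     for value in values:
--         count += value // k
--     return count >= m
--
-- def max_k(n, m, values):
--     left, right = 1, max(values)
--     result = 0
--
--     while left <= right:
--         mid = (left + right) // 2
--         if can_make_k(values, mid, m):
--             result = mid  # mid는 가능하므로 결과 업데이트
--             left = mid + 1  # 더 큰 값을 찾기 위해 범위 조정
--         else:
--             right = mid - 1  # 가능한 값이 아니므로 범위 축소
--
--     return result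
-- ===== SOURCE B (Python) =====
-- def max_k(n, m, values):
--     hi = max(values)
--     bit = 1
--     while bit * 2 <= hi:
--         bit *= 2
--     result = 0
--     while bit >= 1:
--         cand = result + bit
--         if cand <= hi and sum(v // cand for v in values) >= m:
--             result = cand
--         bit //= 2
--     return result
-- ===== Notes on version B (the rewrite author's own statement) =====
-- stated objective: alternative
-- what changed: Replaces the left/right/mid binary search with a bitwise construction of the answer: find the highest power of two not exceeding max(values), then build the result bit by bit, keeping a bit whenever the candidate is within range and sum(v//cand) >= m.
-- outside the precondition, e.g. on max_k(3, -3, [-12, 9, -9]): A returns 0, B returns 9; on max_k(4, 0, [18, -15, -3, 8]): A returns 6, B returns 8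
import Mathlib
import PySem

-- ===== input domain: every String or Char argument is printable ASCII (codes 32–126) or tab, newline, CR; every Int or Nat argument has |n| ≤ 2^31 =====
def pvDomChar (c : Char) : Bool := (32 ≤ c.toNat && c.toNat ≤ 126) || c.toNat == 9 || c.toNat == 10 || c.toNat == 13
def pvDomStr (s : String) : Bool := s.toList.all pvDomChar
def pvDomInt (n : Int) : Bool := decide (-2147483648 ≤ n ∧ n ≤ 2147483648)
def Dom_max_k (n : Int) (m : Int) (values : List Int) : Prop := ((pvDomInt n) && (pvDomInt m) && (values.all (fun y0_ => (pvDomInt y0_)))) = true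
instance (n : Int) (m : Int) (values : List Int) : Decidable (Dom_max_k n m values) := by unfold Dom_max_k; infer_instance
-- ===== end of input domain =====

-- B replaces A's left/right/mid binary search by a bitwise (highest-bit-first) construction of
-- the answer: same cost, genuinely different control flow ("alternative" objective).
-- The Nat fuel arguments below only make the while-loops total; the call sites pass enough fuel
-- for the loops to run to completion exactly as in Python.

-- ===== PORT A =====
def can_make_k (values : List Int) (k : Int) (m : Int) : Bool :=
  decide (m ≤ values.foldl (fun count value => count + PySem.Int.floordiv value k) 0)

def maxkLoop (values : List Int) (m : Int) (fuel : Nat) (left right result : Int) : Int :=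
  match fuel with
  | 0 => result   -- unreachable: the fuel passed below exceeds the iteration count
  | fuel + 1 =>
    if left ≤ right then
      let mid := PySem.Int.floordiv (left + right) 2
      if can_make_k values mid m then
        maxkLoop values m fuel (mid + 1) right mid
      else
        maxkLoop values m fuel left (mid - 1) result
    else result

def max_k (n : Int) (m : Int) (values : List Int) : Int :=
  match PySem.List.max? values (fun x => x) with
  | none => 0   -- Python: max([]) raises ValueError; excluded by Pre_max_k
  | some right => maxkLoop values m (right.toNat + 1) 1 right 0

-- ===== PORT B =====
-- first loop of Source B: highest power of two not exceeding hi (stays 1 if hi < 2)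
def bitUp (fuel : Nat) (hi : Int) (bit : Int) : Int :=
  match fuel with
  | 0 => bit   -- unreachable: the fuel passed below exceeds the iteration count
  | fuel + 1 => if bit * 2 ≤ hi then bitUp fuel hi (bit * 2) else bit

def sumDiv (values : List Int) (k : Int) : Int :=
  (values.map (fun v => PySem.Int.floordiv v k)).sum

-- second loop of Source B: keep a bit whenever the candidate stays in range and is feasible
def bitDown (fuel : Nat) (values : List Int) (m hi bit result : Int) : Int :=
  match fuel with
  | 0 => result   -- unreachable: the fuel passed below exceeds the iteration count
  | fuel + 1 =>
    if 1 ≤ bit then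
      let cand := result + bit
      let result' := if cand ≤ hi ∧ m ≤ sumDiv values cand then cand else result
      bitDown fuel values m hi (PySem.Int.floordiv bit 2) result'
    else result

def max_k_alt (n : Int) (m : Int) (values : List Int) : Int :=
  match PySem.List.max? values (fun x => x) with
  | none => 0   -- Python: max([]) raises ValueError; excluded by Pre_max_k
  | some hi =>
    let bit := bitUp (hi.toNat + 1) hi 1
    bitDown (bit.toNat + 1) values m hi bit 0

-- ===== PRECONDITION & SPEC =====
-- Pre_ excludes the empty list (max(values) raises ValueError in both A and B) and lists mixing a
-- negative value with a positive maximum: there sum(v//k) is not monotone in k and A's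
-- binary-search result is a search-path artefact that neither value specification would fix.
def Pre_max_k (n : Int) (m : Int) (values : List Int) : Prop :=
  values ≠ [] ∧ ((∀ v ∈ values, 0 ≤ v) ∨ (∀ v ∈ values, v ≤ 0))
instance (n : Int) (m : Int) (values : List Int) : Decidable (Pre_max_k n m values) := by
  unfold Pre_max_k; infer_instance

def pvWitness_max_k : Int × Int × List Int := (3, 4, [7, 5, 9])

def Spec_max_k (n : Int) (m : Int) (values : List Int) (out : Int) : Prop := out = max_k_alt n m values
instance (n : Int) (m : Int) (values : List Int) (out : Int) : Decidable (Spec_max_k n m values out) := by unfold Spec_max_k; infer_instance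

-- ===== CLAIM (what is proved, stated in full; the proofs are below) =====
def Claim_equal_max_k : Prop := ∀ (n : Int) (m : Int) (values : List Int), Dom_max_k n m values → Pre_max_k n m values → Spec_max_k n m values (max_k n m values)

-- ===== LEMMAS AND PROOFS =====

-- characterisation: out is the largest k in [1, hi] with m ≤ sum(v // k) (0 if none)
def IsAns (values : List Int) (m hi out : Int) : Prop :=
  (out = 0 ∨ (1 ≤ out ∧ out ≤ hi ∧ m ≤ sumDiv values out)) ∧
  (∀ k, out < k → k ≤ hi → ¬ m ≤ sumDiv values k)

theorem isAns_unique {values : List Int} {m hi a b : Int}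
    (ha : IsAns values m hi a) (hb : IsAns values m hi b) : a = b := by
  obtain ⟨ha1, ha2⟩ := ha
  obtain ⟨hb1, hb2⟩ := hb
  by_contra hne
  rcases lt_or_gt_of_ne hne with hlt | hlt
  · rcases hb1 with h0 | ⟨h1, h2, h3⟩
    · omega
    · exact ha2 b hlt h2 h3
  · rcases ha1 with h0 | ⟨h1, h2, h3⟩
    · omega
    · exact hb2 a hlt h2 h3

theorem floordiv_le_floordiv {v j k : Int} (hv : 0 ≤ v) (hj : 1 ≤ j) (hjk : j ≤ k) :
    PySem.Int.floordiv v k ≤ PySem.Int.floordiv v j := by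
  rw [PySem.Int.le_floordiv_iff_mul_le (by omega)]
  have hk : (0:Int) < k := by omega
  have hek : PySem.Int.floordiv v k = v / k := PySem.Int.floordiv_eq_ediv_of_pos hk
  have hq : 0 ≤ v / k := Int.ediv_nonneg hv (by omega)
  have hqk : v / k * k ≤ v := by
    have h1 := Int.emod_nonneg v (by omega : k ≠ 0)
    have h2 := Int.mul_ediv_add_emod v k
    rw [Int.mul_comm] at h2
    omega
  calc PySem.Int.floordiv v k * j = v / k * j := by rw [hek]
    _ ≤ v / k * k := mul_le_mul_of_nonneg_left hjk hq
    _ ≤ v := hqk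

theorem foldl_sumDiv (values : List Int) (k : Int) : ∀ init : Int,
    values.foldl (fun count value => count + PySem.Int.floordiv value k) init = init + sumDiv values k := by
  induction values with
  | nil => intro init; simp [sumDiv]
  | cons v t ih =>
    intro init
    rw [List.foldl_cons, ih]
    simp [sumDiv]
    ring

theorem can_make_k_eq (values : List Int) (k m : Int) :
    can_make_k values k m = decide (m ≤ sumDiv values k) := by
  unfold can_make_k
  rw [foldl_sumDiv values k 0]
  norm_num

theorem sumDiv_antitone {values : List Int} (hnn : ∀ v ∈ values, 0 ≤ v)
    {j k : Int} (hj : 1 ≤ j) (hjk : j ≤ k) :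
    sumDiv values k ≤ sumDiv values j := by
  induction values with
  | nil => simp [sumDiv]
  | cons v t ih =>
    simp only [sumDiv, List.map_cons, List.sum_cons]
    have h1 : PySem.Int.floordiv v k ≤ PySem.Int.floordiv v j :=
      floordiv_le_floordiv (hnn v (by simp)) hj hjk
    have h2 := ih (fun w hw => hnn w (by simp [hw]))
    simp only [sumDiv] at h2
    omega

theorem feas_down {values : List Int} (hnn : ∀ v ∈ values, 0 ≤ v)
    {m j k : Int} (hj : 1 ≤ j) (hjk : j ≤ k) (hk : m ≤ sumDiv values k) :
    m ≤ sumDiv values j :=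
  le_trans hk (sumDiv_antitone hnn hj hjk)

theorem maxkLoop_isAns {values : List Int} {m hi : Int} (hnn : ∀ v ∈ values, 0 ≤ v) :
    ∀ (fuel : Nat) (left right result : Int),
    (right + 1 - left).toNat < fuel → 1 ≤ left → result = left - 1 → right ≤ hi →
    left ≤ right + 1 →
    (result = 0 ∨ (1 ≤ result ∧ m ≤ sumDiv values result)) →
    (∀ k, right < k → k ≤ hi → ¬ m ≤ sumDiv values k) →
    IsAns values m hi (maxkLoop values m fuel left right result) := by
  intro fuel
  induction fuel with
  | zero => intro left right result hfuel; omega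
  | succ fuel ih =>
    intro left right result hfuel h1 h2 h3 h4 h5 h6
    show IsAns values m hi (maxkLoop values m (fuel + 1) left right result)
    rw [maxkLoop]
    by_cases hlr : left ≤ right
    · rw [if_pos hlr]
      have hmid := PySem.Int.floordiv_two_mid_bounds hlr
      set mid := PySem.Int.floordiv (left + right) 2 with hmiddef
      by_cases hcan : can_make_k values mid m = true
      · simp only [hcan, if_true]
        refine ih (mid + 1) right mid (by omega) (by omega) (by omega) h3 (by omega) ?_ h6
        right
        refine ⟨by omega, ?_⟩
        rw [can_make_k_eq] at hcan
        exact of_decide_eq_true hcan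
      · simp only [hcan]
        refine ih left (mid - 1) result (by omega) h1 h2 (by omega) (by omega) h5 ?_
        intro k hk1 hk2 hfeas
        rw [can_make_k_eq] at hcan
        by_cases hkr : right < k
        · exact h6 k hkr hk2 hfeas
        · exact hcan (decide_eq_true (feas_down hnn (by omega) (by omega) hfeas))
    · rw [if_neg hlr]
      constructor
      · rcases h5 with h0 | ⟨ha, hb⟩
        · exact Or.inl h0
        · exact Or.inr ⟨ha, by omega, hb⟩
      · intro k hk1 hk2
        exact h6 k (by omega) hk2

theorem bitUp_spec (hi : Int) : ∀ (fuel : Nat) (bit : Int),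
    (hi - bit).toNat < fuel → (∃ i : ℕ, bit = 2 ^ i) →
    (∃ i : ℕ, bitUp fuel hi bit = 2 ^ i) ∧ hi < bitUp fuel hi bit * 2 := by
  intro fuel
  induction fuel with
  | zero => intro bit hfuel; omega
  | succ fuel ih =>
    intro bit hfuel hpow
    obtain ⟨i, hbit⟩ := hpow
    have hb1 : 1 ≤ bit := by rw [hbit]; exact one_le_pow₀ (by norm_num)
    rw [bitUp]
    by_cases h : bit * 2 ≤ hi
    · rw [if_pos h]
      exact ih (bit * 2) (by omega) ⟨i + 1, by rw [hbit, pow_succ]⟩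
    · rw [if_neg h]
      exact ⟨⟨i, hbit⟩, by omega⟩

theorem bitDown_bit_zero (values : List Int) (m hi result : Int) :
    ∀ fuel : Nat, bitDown fuel values m hi 0 result = result := by
  intro fuel
  cases fuel with
  | zero => rfl
  | succ fuel => rw [bitDown, if_neg (by norm_num)]

theorem bitDown_isAns {values : List Int} {m hi : Int} (hnn : ∀ v ∈ values, 0 ≤ v) :
    ∀ (i : ℕ) (fuel : Nat) (result : Int), i < fuel → 0 ≤ result →
    (result = 0 ∨ (1 ≤ result ∧ result ≤ hi ∧ m ≤ sumDiv values result)) →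
    (∀ k, result + 2 * (2 ^ i : Int) ≤ k → k ≤ hi → ¬ m ≤ sumDiv values k) →
    IsAns values m hi (bitDown fuel values m hi (2 ^ i) result) := by
  intro i
  induction i with
  | zero =>
    intro fuel result hfuel hr0 hrP hreg
    obtain ⟨fuel, rfl⟩ : ∃ f, fuel = f + 1 := ⟨fuel - 1, by omega⟩
    rw [bitDown, if_pos (by norm_num)]
    have hdiv : PySem.Int.floordiv (1:Int) 2 = 0 := by
      rw [PySem.Int.floordiv_eq_ediv_of_pos (by norm_num)]
      norm_num
    simp only [pow_zero, hdiv, bitDown_bit_zero]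
    by_cases hc : result + 1 ≤ hi ∧ m ≤ sumDiv values (result + 1)
    · rw [if_pos hc]
      refine ⟨Or.inr ⟨by omega, hc.1, hc.2⟩, ?_⟩
      intro k hk1 hk2
      exact hreg k (by omega) hk2
    · rw [if_neg hc]
      refine ⟨hrP, ?_⟩
      intro k hk1 hk2 hfeas
      by_cases hke : k = result + 1
      · exact hc ⟨by omega, by rw [← hke]; exact hfeas⟩
      · exact hreg k (by omega) hk2 hfeas
  | succ i ih =>
    intro fuel result hfuel hr0 hrP hreg
    obtain ⟨fuel, rfl⟩ : ∃ f, fuel = f + 1 := ⟨fuel - 1, by omega⟩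
    have hp1 : (1:Int) ≤ 2 ^ (i + 1) := one_le_pow₀ (by norm_num)
    have hpi : (1:Int) ≤ 2 ^ i := one_le_pow₀ (by norm_num)
    rw [bitDown, if_pos hp1]
    have hdiv : PySem.Int.floordiv ((2:Int) ^ (i + 1)) 2 = 2 ^ i := by
      rw [PySem.Int.floordiv_eq_ediv_of_pos (by norm_num), pow_succ]
      exact Int.mul_ediv_cancel _ (by norm_num)
    simp only [hdiv]
    have hsum : (2:Int) ^ (i + 1) = 2 ^ i + 2 ^ i := by rw [pow_succ]; ring
    by_cases hc : result + 2 ^ (i + 1) ≤ hi ∧ m ≤ sumDiv values (result + 2 ^ (i + 1))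
    · rw [if_pos hc]
      refine ih fuel (result + 2 ^ (i + 1)) (by omega) (by omega) (Or.inr ⟨by omega, hc.1, hc.2⟩) ?_
      intro k hk1 hk2
      exact hreg k (by omega) hk2
    · rw [if_neg hc]
      refine ih fuel result (by omega) hr0 hrP ?_
      intro k hk1 hk2 hfeas
      by_cases hbig : result + 2 * 2 ^ (i + 1) ≤ k
      · exact hreg k hbig hk2 hfeas
      · -- result + 2^(i+1) ≤ k < result + 2*2^(i+1): feasibility at k gives it at the candidate
        exact hc ⟨by omega, feas_down hnn (by omega) (by omega) hfeas⟩

-- ===== VERDICT (by name: the statement is the Claim_ definition above) =====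
theorem max_k_spec : Claim_equal_max_k := by
  intro n m values _ hpre
  obtain ⟨hne, hsign⟩ := hpre
  unfold Spec_max_k max_k max_k_alt
  cases hmax : PySem.List.max? values (fun x => x) with
  | none => exact absurd ((PySem.List.max?_eq_none_iff values (fun x => x)).mp hmax) hne
  | some hi =>
    have hmem : hi ∈ values := PySem.List.max?_mem hmax
    show maxkLoop values m (hi.toNat + 1) 1 hi 0
        = bitDown ((bitUp (hi.toNat + 1) hi 1).toNat + 1) values m hi (bitUp (hi.toNat + 1) hi 1) 0
    rcases hsign with hnn | hle
    · -- all values nonnegative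
      have hhi0 : 0 ≤ hi := hnn hi hmem
      have hA : IsAns values m hi (maxkLoop values m (hi.toNat + 1) 1 hi 0) :=
        maxkLoop_isAns hnn (hi.toNat + 1) 1 hi 0 (by omega) (by omega) (by omega) (by omega)
          (by omega) (Or.inl rfl) (fun k hk1 hk2 _ => by omega)
      obtain ⟨⟨i, hbit⟩, hlt⟩ := bitUp_spec hi (hi.toNat + 1) 1 (by omega) ⟨0, by norm_num⟩
      have hif : i < (bitUp (hi.toNat + 1) hi 1).toNat + 1 := by
        have : (i:Int) < 2 ^ i := by exact_mod_cast Nat.lt_two_pow_self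
        omega
      have hB : IsAns values m hi (bitDown ((bitUp (hi.toNat + 1) hi 1).toNat + 1) values m hi (2 ^ i) 0) :=
        bitDown_isAns hnn i ((bitUp (hi.toNat + 1) hi 1).toNat + 1) 0 hif (by omega)
          (Or.inl rfl) (fun k hk1 hk2 _ => by omega)
      rw [hbit]
      exact isAns_unique hA (hbit ▸ hB)
    · -- max(values) ≤ 0: both searches are empty and return 0
      have hhi0 : hi ≤ 0 := hle hi hmem
      have hA : maxkLoop values m (hi.toNat + 1) 1 hi 0 = 0 := by
        have : hi.toNat = 0 := by omega
        rw [this]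
        rw [maxkLoop, if_neg (by omega)]
      have hup : bitUp (hi.toNat + 1) hi 1 = 1 := by
        have : hi.toNat = 0 := by omega
        rw [this]
        rw [bitUp, if_neg (by omega)]
      rw [hA, hup]
      have hdiv : PySem.Int.floordiv (1:Int) 2 = 0 := by
        rw [PySem.Int.floordiv_eq_ediv_of_pos (by norm_num)]
        norm_num
      show (0:Int) = bitDown 2 values m hi 1 0
      rw [bitDown, if_pos (by norm_num)]
      simp only [hdiv, bitDown_bit_zero]
      rw [if_neg (by omega)]
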